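-- pv_equiv track=rewrite | github.com/Brubzick/feature-extraction-from-asm | read_asm.py | Split2Functions
-- ===== SOURCE A (Python) =====
-- def Split2Functions(asmLines):
--     funcRanges = []
--     start = 0
--     end = 0
--
--     # 移到第一个函数的开头
--     for i in range(len(asmLines)):
--         line = asmLines[i]
--         if isFunctionEnd(line):
--             start = i
--             end = i
--             break
--     # 遍历函数
--     for i in range(start, len(asmLines)):
--         line = asmLines[i]
--         if isFunctionEnd(line):
--             end = i
--             if end > start + 1:
--                 funcRanges.append((start, end)) # 不包括end
--             start = i
--     # 最后一个
--     end = len(asmLines)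
--     if end > start + 1:
--         funcRanges.append((start, end))
--
--     return funcRanges
--
-- def isFunctionEnd(line):
--     return line[0] != ' ' and (line[0] != '.' or line.startswith('.omp_')) and (':' in line)
-- ===== SOURCE B (Python) =====
-- def Split2Functions(asmLines):
--     bounds = [i for i, line in enumerate(asmLines) if isFunctionEnd(line)]
--     pts = (bounds if bounds else [0]) + [len(asmLines)]
--     return [(a, b) for a, b in zip(pts, pts[1:]) if b > a + 1]
--
-- def isFunctionEnd(line):
--     return line[0] != ' ' and (line[0] != '.' or line.startswith('.omp_')) and (':' in line)
-- ===== Notes on version B (the rewrite author's own statement) =====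
-- stated objective: simpler
-- what changed: Replaces A's two-loop running-start state machine (find-first-boundary loop with break, then a mutating scan plus a special-cased final range) with a declarative pipeline: collect all boundary indices once (falling back to [0]), append the length as a sentinel endpoint, and filter adjacent pairs with gap > 1.
import Mathlib
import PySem

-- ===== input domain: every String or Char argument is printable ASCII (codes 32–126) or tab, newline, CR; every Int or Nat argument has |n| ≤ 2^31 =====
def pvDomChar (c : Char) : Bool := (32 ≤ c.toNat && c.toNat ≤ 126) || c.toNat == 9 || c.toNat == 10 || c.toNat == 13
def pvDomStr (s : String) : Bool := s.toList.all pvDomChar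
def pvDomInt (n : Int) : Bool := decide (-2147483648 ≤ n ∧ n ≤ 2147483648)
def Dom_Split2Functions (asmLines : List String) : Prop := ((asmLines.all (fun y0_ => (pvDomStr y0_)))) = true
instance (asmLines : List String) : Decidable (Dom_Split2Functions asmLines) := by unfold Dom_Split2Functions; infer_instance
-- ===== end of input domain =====

-- B replaces A's two-loop running-start state machine by a boundary-index table plus one
-- uniform adjacent-pair filtering pass (objective: simpler; same asymptotic cost).

-- ===== PORT A =====
-- shared helper isFunctionEnd; Python raises IndexError on line == "" (excluded by Pre_),
-- the port returns false there
def isFnEnd (line : String) : Bool :=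
  match PySem.Str.pyGet? line 0 with
  | none => false
  | some c =>
      decide (c ≠ ' ') && (decide (c ≠ '.') || PySem.Str.startswith line ".omp_") &&
        PySem.Str.isIn ":" line

-- first loop (with break): scan range(len(asmLines)) for the first function end; 0 if none
def findLoopA (asmLines : List String) : List Int → Int
  | [] => 0
  | i :: rest =>
      if isFnEnd (PySem.List.pyGetD asmLines i "") then i else findLoopA asmLines rest

-- body of the second loop; state = (funcRanges, start)
def stepA (asmLines : List String) (st : List (Int × Int) × Int) (i : Int) :
    List (Int × Int) × Int :=
  if isFnEnd (PySem.List.pyGetD asmLines i "") then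
    ((if i > st.2 + 1 then st.1 ++ [(st.2, i)] else st.1), i)
  else st

def Split2Functions (asmLines : List String) : List (Int × Int) :=
  let n : Int := asmLines.length
  let start := findLoopA asmLines (PySem.List.pyRange 0 n 1)
  let res := (PySem.List.pyRange start n 1).foldl (stepA asmLines) ([], start)
  if n > res.2 + 1 then res.1 ++ [(res.2, n)] else res.1

-- ===== PORT B =====
def Split2Functions_alt (asmLines : List String) : List (Int × Int) :=
  let bounds := ((PySem.List.enumerate asmLines 0).filter (fun p => isFnEnd p.2)).map (·.1)
  let pts := (if bounds = [] then [0] else bounds) ++ [(asmLines.length : Int)]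
  (pts.zip (PySem.List.slice pts (some 1) none)).filter (fun p => p.2 > p.1 + 1)

-- ===== PRECONDITION & SPEC =====
-- Pre_ excludes inputs containing an empty line, on which A (and B) raise IndexError in
-- isFunctionEnd(line) at line[0].
def Pre_Split2Functions (asmLines : List String) : Prop := ∀ l ∈ asmLines, l ≠ ""
instance (asmLines : List String) : Decidable (Pre_Split2Functions asmLines) := by
  unfold Pre_Split2Functions; infer_instance
def pvWitness_Split2Functions : List String := ["f:", " mov", " ret", "g:", " nop"]

def Spec_Split2Functions (asmLines : List String) (out : List (Int × Int)) : Prop :=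
  out = Split2Functions_alt asmLines
instance (asmLines : List String) (out : List (Int × Int)) :
    Decidable (Spec_Split2Functions asmLines out) := by
  unfold Spec_Split2Functions; infer_instance

-- ===== CLAIM (what is proved, stated in full; the proofs are below) =====
def Claim_equal_Split2Functions : Prop :=
  ∀ (asmLines : List String), Dom_Split2Functions asmLines →
    Pre_Split2Functions asmLines →
    Spec_Split2Functions asmLines (Split2Functions asmLines)

-- ===== LEMMAS AND PROOFS =====

-- boundary indices of xs, offset k (proof-side characterisation)
def pvBnds (k : Int) : List String → List Int
  | [] => []
  | l :: r => if isFnEnd l then k :: pvBnds (k + 1) r else pvBnds (k + 1) r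

-- A's second loop, as a function of the boundary list
def pvG (s : Int) : List Int → List (Int × Int) × Int
  | [] => ([], s)
  | b :: r =>
      let t := pvG b r
      ((if b > s + 1 then [(s, b)] else []) ++ t.1, t.2)

-- B's adjacent-pair filter, recursively
def pvZF : List Int → List (Int × Int)
  | a :: b :: r => (if b > a + 1 then [(a, b)] else []) ++ pvZF (b :: r)
  | _ => []

-- enumerate/filter/map computes pvBnds
theorem bnds_eq (xs : List String) : ∀ k : Int,
    ((PySem.List.enumerate xs k).filter (fun p => isFnEnd p.2)).map (·.1) = pvBnds k xs := by
  induction xs with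
  | nil => intro k; simp [pvBnds, PySem.List.enumerate_nil]
  | cons l r ih =>
      intro k
      rw [PySem.List.enumerate_cons]
      by_cases h : isFnEnd l <;> simp [pvBnds, h, ih]

-- zip-with-tail filter computes pvZF
theorem zf_eq : ∀ l : List Int,
    (l.zip (l.drop 1)).filter (fun p => p.2 > p.1 + 1) = pvZF l := by
  intro l
  induction l with
  | nil => simp [pvZF]
  | cons a t ih =>
      cases t with
      | nil => simp [pvZF]
      | cons b r =>
          by_cases h : b > a + 1 <;> simpa [pvZF, h] using ih

-- the fold of A's loop body over an enumerated suffix computes pvG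
def stepE (st : List (Int × Int) × Int) (p : Int × String) : List (Int × Int) × Int :=
  if isFnEnd p.2 then
    ((if p.1 > st.2 + 1 then st.1 ++ [(st.2, p.1)] else st.1), p.1)
  else st

theorem loop2_enum (ys : List String) : ∀ (k : Int) (acc : List (Int × Int)) (s : Int),
    (PySem.List.enumerate ys k).foldl stepE (acc, s)
      = (acc ++ (pvG s (pvBnds k ys)).1, (pvG s (pvBnds k ys)).2) := by
  induction ys with
  | nil => intro k acc s; simp [pvBnds, pvG, PySem.List.enumerate_nil]
  | cons l r ih =>
      intro k acc s
      rw [PySem.List.enumerate_cons]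
      by_cases h : isFnEnd l
      · by_cases hk : k > s + 1 <;>
          simp [pvBnds, pvG, stepE, h, hk, ih, List.append_assoc]
      · simp [pvBnds, stepE, h, ih]

-- the pyRange fold of port A equals the enumerate fold over the corresponding suffix
theorem range_fold (xs : List String) : ∀ (d s : Nat), s + d = xs.length →
    ∀ init : List (Int × Int) × Int,
    (PySem.List.pyRange (s : Int) (xs.length : Int) 1).foldl (stepA xs) init
      = (PySem.List.enumerate (xs.drop s) (s : Int)).foldl stepE init := by
  intro d
  induction d with
  | zero =>
      intro s hs init
      rw [PySem.List.pyRange_one_eq_nil (by omega),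
        List.drop_eq_nil_of_le (as := xs) (i := s) (by omega)]
      simp [PySem.List.enumerate_nil]
  | succ d ih =>
      intro s hs init
      have hlt : s < xs.length := by omega
      rw [PySem.List.pyRange_one_cons (by exact_mod_cast hlt)]
      rw [List.drop_eq_getElem_cons hlt, PySem.List.enumerate_cons]
      simp only [List.foldl_cons]
      have hcast : (s : Int) + 1 = ((s + 1 : Nat) : Int) := by push_cast; ring
      have hget : PySem.List.pyGetD xs (s : Int) "" = xs[s] := by simp [hlt]
      rw [hcast, ih (s + 1) (by omega)]
      simp [stepA, stepE, hget]

-- A's first loop returns the first boundary index of the suffix from s (0 if none)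
theorem findLoop_eq (xs : List String) : ∀ (d s : Nat), s + d = xs.length →
    findLoopA xs (PySem.List.pyRange (s : Int) (xs.length : Int) 1)
      = (match pvBnds (s : Int) (xs.drop s) with | [] => 0 | b :: _ => b) := by
  intro d
  induction d with
  | zero =>
      intro s hs
      rw [PySem.List.pyRange_one_eq_nil (by omega),
        List.drop_eq_nil_of_le (as := xs) (i := s) (by omega)]
      simp [pvBnds, findLoopA]
  | succ d ih =>
      intro s hs
      have hlt : s < xs.length := by omega
      rw [PySem.List.pyRange_one_cons (by exact_mod_cast hlt)]
      rw [List.drop_eq_getElem_cons hlt]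
      have hget : PySem.List.pyGetD xs (s : Int) "" = xs[s] := by simp [hlt]
      have hcast : (s : Int) + 1 = ((s + 1 : Nat) : Int) := by push_cast; ring
      by_cases h : isFnEnd xs[s]
      · simp [findLoopA, hget, h, pvBnds]
      · simp only [findLoopA, hget, h, pvBnds, Bool.false_eq_true, if_false]
        rw [hcast, ih (s + 1) (by omega)]

-- bounds on members of pvBnds
theorem pvBnds_mem (xs : List String) : ∀ (k : Int) (y : Int),
    y ∈ pvBnds k xs → k ≤ y ∧ y < k + xs.length := by
  induction xs with
  | nil => intro k y hy; simp [pvBnds] at hy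
  | cons l r ih =>
      intro k y hy
      rw [pvBnds] at hy
      by_cases h : isFnEnd l
      · rw [if_pos h] at hy
        rcases List.mem_cons.1 hy with rfl | hy'
        · refine ⟨le_refl _, ?_⟩
          simp only [List.length_cons]; push_cast; omega
        · have h2 := ih (k + 1) y hy'
          refine ⟨by omega, ?_⟩
          simp only [List.length_cons]; push_cast; omega
      · rw [if_neg h] at hy
        have h2 := ih (k + 1) y hy
        refine ⟨by omega, ?_⟩
        simp only [List.length_cons]; push_cast; omega

-- splitting pvBnds at a position s
theorem pvBnds_split (xs : List String) : ∀ (s : Nat) (k : Int),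
    pvBnds k xs = pvBnds k (xs.take s) ++ pvBnds (k + s) (xs.drop s) := by
  induction xs with
  | nil => intro s k; simp [pvBnds]
  | cons l r ih =>
      intro s k
      cases s with
      | zero => simp [pvBnds]
      | succ s =>
          have hk : k + 1 + (s : Int) = k + ((s + 1 : Nat) : Int) := by push_cast; ring
          by_cases h : isFnEnd l <;>
            simp [pvBnds, h, List.take_succ_cons, List.drop_succ_cons, ih s (k + 1), hk]

-- if the boundary list is b :: rest, the suffix from b carries exactly b :: rest
theorem pvBnds_drop_head (xs : List String) (b : Int) (rest : List Int)
    (h : pvBnds 0 xs = b :: rest) :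
    pvBnds b (xs.drop b.toNat) = b :: rest ∧ 0 ≤ b ∧ b.toNat < xs.length := by
  have hb := pvBnds_mem xs 0 b (by rw [h]; simp)
  have hb0 : 0 ≤ b := hb.1
  have hbl : b < xs.length := by have := hb.2; omega
  have hsplit := pvBnds_split xs b.toNat 0
  rw [h] at hsplit
  have hcast : (0 : Int) + (b.toNat : Int) = b := by omega
  rw [hcast] at hsplit
  cases htake : pvBnds 0 (xs.take b.toNat) with
  | nil =>
      rw [htake] at hsplit; simp at hsplit
      exact ⟨hsplit.symm, hb0, by omega⟩
  | cons t ts =>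
      exfalso
      have ht := pvBnds_mem (xs.take b.toNat) 0 t (by rw [htake]; simp)
      have hlen : (xs.take b.toNat).length ≤ b.toNat := by
        simp
      rw [htake] at hsplit
      simp at hsplit
      have : t = b := hsplit.1.symm
      omega

-- A's tail step on pvG equals pvZF with the sentinel endpoint appended
theorem g_zf : ∀ (bs : List Int) (s n : Int),
    (if n > (pvG s bs).2 + 1 then (pvG s bs).1 ++ [((pvG s bs).2, n)] else (pvG s bs).1)
      = pvZF (s :: bs ++ [n]) := by
  intro bs
  induction bs with
  | nil =>
      intro s n
      by_cases h : n > s + 1 <;> simp [pvG, pvZF, h]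
  | cons b r ih =>
      intro s n
      have hz : pvZF (s :: (b :: r) ++ [n])
          = (if b > s + 1 then [(s, b)] else []) ++ pvZF (b :: r ++ [n]) := by
        simp [pvZF]
      simp only [pvG]
      rw [hz, ← ih b n]
      by_cases hn : n > (pvG b r).2 + 1 <;> simp [hn, List.append_assoc]

theorem pvG_self (b : Int) (r : List Int) : pvG b (b :: r) = pvG b r := by
  simp [pvG]

-- ===== VERDICT (by name: the statement is the Claim_ definition above) =====
theorem Split2Functions_spec : Claim_equal_Split2Functions := by
  intro asmLines _ _
  unfold Spec_Split2Functions Split2Functions Split2Functions_alt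
  dsimp only
  rw [bnds_eq asmLines 0, PySem.List.slice_from _ (by omega)]
  rw [show Int.toNat 1 = 1 from rfl, zf_eq]
  cases h : pvBnds 0 asmLines with
  | nil =>
      have h0 := findLoop_eq asmLines asmLines.length 0 (by omega)
      simp only [Nat.cast_zero, List.drop_zero, h] at h0
      rw [h0]
      have hr := range_fold asmLines asmLines.length 0 (by omega) ([], 0)
      simp only [Nat.cast_zero, List.drop_zero] at hr
      rw [hr, loop2_enum asmLines 0 [] 0, h]
      simp [pvG, pvZF]
  | cons b rest =>
      obtain ⟨hd, hb0, hbl⟩ := pvBnds_drop_head asmLines b rest h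
      have hstart : findLoopA asmLines (PySem.List.pyRange 0 (asmLines.length : Int) 1) = b := by
        have h0 := findLoop_eq asmLines asmLines.length 0 (by omega)
        simp only [Nat.cast_zero, List.drop_zero, h] at h0
        exact h0
      rw [hstart]
      have hcast : ((b.toNat : Nat) : Int) = b := by omega
      have hr := range_fold asmLines (asmLines.length - b.toNat) b.toNat (by omega) ([], b)
      rw [hcast] at hr
      rw [hr, loop2_enum, hd, pvG_self]
      simp only [List.nil_append]
      rw [g_zf rest b (asmLines.length : Int)]
      simp
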